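-- pv_equiv track=rewrite | github.com/ra000sh-jpg/auto_blog_generator | modules/automation/trend_job_service.py | _build_seed_keywords
-- ===== SOURCE A (Python) =====
-- from typing import Any, List, Optional
--
-- def _build_seed_keywords(keyword: str) -> List[str]:
--     """seed_keywords를 구성한다."""
--     seed_keywords = [keyword.strip()]
--     if " " in keyword:
--         for token in keyword.split():
--             token = token.strip()
--             if token and token not in seed_keywords:
--                 seed_keywords.append(token)
--             if len(seed_keywords) >= 3:
--                 break
--     return seed_keywords
-- ===== SOURCE B (Python) =====
-- from typing import Any, List, Optional
--
-- def _build_seed_keywords(keyword: str) -> List[str]: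
--     """seed_keywords를 구성한다."""
--     candidates = [keyword.strip()]
--     if " " in keyword:
--         candidates.extend(keyword.split())
--     return list(dict.fromkeys(candidates))[:3]
-- ===== Notes on version B (the rewrite author's own statement) =====
-- stated objective: idiomatic
-- what changed: Replaces A's interleaved membership-check-and-early-break loop with a two-phase build: collect all candidates (stripped keyword plus split tokens), then one order-preserving dedup via dict.fromkeys sliced to the first 3.
import Mathlib
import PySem

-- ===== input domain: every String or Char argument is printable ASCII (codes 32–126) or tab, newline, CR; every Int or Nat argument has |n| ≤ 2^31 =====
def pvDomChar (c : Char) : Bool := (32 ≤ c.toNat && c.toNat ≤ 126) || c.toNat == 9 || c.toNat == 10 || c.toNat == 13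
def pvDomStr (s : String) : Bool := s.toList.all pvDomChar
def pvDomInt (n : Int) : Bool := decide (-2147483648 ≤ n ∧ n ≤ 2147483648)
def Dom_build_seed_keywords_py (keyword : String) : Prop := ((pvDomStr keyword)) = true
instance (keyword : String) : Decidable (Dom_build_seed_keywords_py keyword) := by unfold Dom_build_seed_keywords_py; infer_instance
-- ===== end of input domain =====

-- B builds the whole candidate list first (stripped keyword plus split tokens) and then does one
-- ordered dedup (dict.fromkeys) sliced to the first 3, instead of A's interleaved
-- membership-check-and-early-break loop; same return values, more idiomatic shape.

-- ===== PORT A =====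
-- A's 'for token in keyword.split(): …' loop with its early break once len(seed_keywords) >= 3
def buildSeedLoop (tokens : List String) (seed : List String) : List String :=
  match tokens with
  | [] => seed
  | tok :: rest =>
    let token := PySem.Str.strip tok
    let seed' := if token ≠ "" ∧ token ∉ seed then seed ++ [token] else seed
    if 3 ≤ seed'.length then seed' else buildSeedLoop rest seed'

def build_seed_keywords_py (keyword : String) : List String :=
  let seed_keywords := [PySem.Str.strip keyword]
  if PySem.Str.isIn " " keyword then buildSeedLoop (PySem.Str.split₀ keyword) seed_keywords
  else seed_keywords

-- ===== PORT B =====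
def build_seed_keywords_py_alt (keyword : String) : List String :=
  let candidates := [PySem.Str.strip keyword] ++
    (if PySem.Str.isIn " " keyword then PySem.Str.split₀ keyword else [])
  (PySem.List.dedup candidates).take 3

-- ===== PRECONDITION & SPEC =====
def Spec_build_seed_keywords_py (keyword : String) (out : List String) : Prop := out = build_seed_keywords_py_alt keyword
instance (keyword : String) (out : List String) : Decidable (Spec_build_seed_keywords_py keyword out) := by unfold Spec_build_seed_keywords_py; infer_instance

-- ===== CLAIM (what is proved, stated in full; the proofs are below) =====
def Claim_equal_build_seed_keywords_py : Prop := ∀ (keyword : String), Dom_build_seed_keywords_py keyword → Spec_build_seed_keywords_py keyword (build_seed_keywords_py keyword)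

-- ===== LEMMAS AND PROOFS =====

-- invariant of str.split()'s scanner: every word it emits is nonempty and whitespace-free
theorem split0_go_mem (s : List Char) : ∀ (cur : List Char) (acc : List (List Char)) (t : List Char),
    (∀ c ∈ cur, PySem.Chars.isspace c = false) →
    (∀ u ∈ acc, u ≠ [] ∧ ∀ c ∈ u, PySem.Chars.isspace c = false) →
    t ∈ PySem.Chars.split₀.go s cur acc →
    t ≠ [] ∧ ∀ c ∈ t, PySem.Chars.isspace c = false := by
  induction s with
  | nil =>
    intro cur acc t hcur hacc ht
    rw [PySem.Chars.split₀.go] at ht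
    split at ht
    · simp at ht; exact hacc t ht
    · simp at ht
      rcases ht with h | h
      · exact hacc t h
      · subst h
        constructor
        · simpa using (by rename_i h'; simpa using h')
        · intro c hc; exact hcur c (List.mem_reverse.mp hc)
  | cons c rest ih =>
    intro cur acc t hcur hacc ht
    rw [PySem.Chars.split₀.go] at ht
    by_cases hsp : PySem.Chars.isspace c = true
    · rw [if_pos hsp] at ht
      split at ht
      · exact ih [] acc t (by simp) hacc ht
      · refine ih [] (cur.reverse :: acc) t (by simp) ?_ ht
        intro u hu
        rcases List.mem_cons.mp hu with h | h
        · subst h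
          refine ⟨by simpa using (by rename_i h'; simpa using h'), ?_⟩
          intro d hd; exact hcur d (List.mem_reverse.mp hd)
        · exact hacc u h
    · rw [if_neg hsp] at ht
      refine ih (c :: cur) acc t ?_ hacc ht
      intro d hd
      rcases List.mem_cons.mp hd with h | h
      · subst h; simpa using hsp
      · exact hcur d h

theorem chars_split0_mem (s t : List Char) (h : t ∈ PySem.Chars.split₀ s) :
    t ≠ [] ∧ ∀ c ∈ t, PySem.Chars.isspace c = false :=
  split0_go_mem s [] [] t (by simp) (by simp) h

theorem dropWhile_isspace_eq (cs : List Char) (h : ∀ c ∈ cs, PySem.Chars.isspace c = false) :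
    List.dropWhile PySem.Chars.isspace cs = cs := by
  cases cs with
  | nil => rfl
  | cons c t => simp [h c (by simp)]

theorem strip_eq_self (cs : List Char) (h : ∀ c ∈ cs, PySem.Chars.isspace c = false) :
    PySem.Chars.strip cs = cs := by
  simp [PySem.Chars.strip, PySem.Chars.lstrip, PySem.Chars.rstrip,
    dropWhile_isspace_eq _ h, dropWhile_isspace_eq _ (fun c hc => h c (List.mem_reverse.mp hc))]

-- for A's loop body: a token of keyword.split() survives .strip() unchanged and is truthy
theorem str_strip_of_mem_split (keyword : String) (t : String) (h : t ∈ PySem.Str.split₀ keyword) :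
    PySem.Str.strip t = t ∧ t ≠ "" := by
  simp only [PySem.Str.split₀, List.mem_map] at h
  obtain ⟨u, hu, rfl⟩ := h
  obtain ⟨hne, hsp⟩ := chars_split0_mem _ u hu
  have htl : (String.ofList u).toList = u := by simp
  constructor
  · simp only [PySem.Str.strip, htl, strip_eq_self u hsp]
  · intro hcontra
    apply hne
    have := congrArg String.toList hcontra
    simpa [htl] using this

theorem foldl_add_prefix (ts : List String) : ∀ s : List String, s <+: ts.foldl PySem.Set.add s := by
  induction ts with
  | nil => intro s; exact List.prefix_rfl
  | cons t ts ih =>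
    intro s
    refine List.IsPrefix.trans ?_ (ih (PySem.Set.add s t))
    simp only [PySem.Set.add]
    split
    · exact List.prefix_rfl
    · exact List.prefix_append _ _

-- A's break-at-3 loop over whitespace-free nonempty tokens IS take 3 of the ordered-dedup fold
theorem loop_eq_take (tokens : List String)
    (htok : ∀ t ∈ tokens, PySem.Str.strip t = t ∧ t ≠ "") :
    ∀ seed : List String, seed.length < 3 →
    buildSeedLoop tokens seed = (tokens.foldl PySem.Set.add seed).take 3 := by
  induction tokens with
  | nil =>
    intro seed h
    rw [buildSeedLoop]
    simp [List.take_of_length_le (by omega : seed.length ≤ 3)]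
  | cons t ts ih =>
    intro seed hlen
    obtain ⟨hstrip, hne⟩ := htok t (by simp)
    rw [buildSeedLoop]
    simp only [hstrip]
    have hadd : (if t ≠ "" ∧ t ∉ seed then seed ++ [t] else seed) = PySem.Set.add seed t := by
      simp only [PySem.Set.add, PySem.Set.contains]
      by_cases hm : t ∈ seed
      · simp [hm]
      · simp [hm, hne]
    rw [hadd]
    have hlen' : (PySem.Set.add seed t).length ≤ seed.length + 1 := by
      simp only [PySem.Set.add]; split <;> simp
    by_cases h3 : 3 ≤ (PySem.Set.add seed t).length
    · rw [if_pos h3]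
      have heq : (PySem.Set.add seed t).length = 3 := by omega
      simp only [List.foldl_cons]
      obtain ⟨e, he⟩ := foldl_add_prefix ts (PySem.Set.add seed t)
      rw [← he, ← heq, List.take_left]
    · rw [if_neg h3]
      simp only [List.foldl_cons]
      exact ih (fun u hu => htok u (by simp [hu])) (PySem.Set.add seed t) (by omega)

-- ===== VERDICT (by name: the statement is the Claim_ definition above) =====
theorem build_seed_keywords_py_spec : Claim_equal_build_seed_keywords_py := by
  intro keyword _
  unfold Spec_build_seed_keywords_py build_seed_keywords_py build_seed_keywords_py_alt
  by_cases h : PySem.Str.isIn " " keyword = true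
  · simp only [h, if_true]
    rw [PySem.List.dedup_eq_ofList, PySem.Set.ofList_eq_foldl]
    simp only [List.singleton_append, List.foldl_cons]
    have hadd0 : PySem.Set.add [] (PySem.Str.strip keyword) = [PySem.Str.strip keyword] := by
      simp [PySem.Set.add, PySem.Set.contains]
    rw [hadd0]
    exact loop_eq_take (PySem.Str.split₀ keyword)
      (fun t ht => str_strip_of_mem_split keyword t ht) [PySem.Str.strip keyword] (by simp)
  · simp only [h]
    rw [PySem.List.dedup_eq_ofList, PySem.Set.ofList_eq_foldl]
    simp [PySem.Set.add, PySem.Set.contains]
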